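-- pv_equiv track=rewrite | github.com/raulpenaguiao/project-euler | CL/CL_Partitions.py | Partition_Generate
-- ===== SOURCE A (Python) =====
-- def Partition_Generate(n):
--     ans = [[[]]]
--     l = 0
--     while l < n:
--         l += 1
--         new_parts = []
--         for k in range(l):
--             for partition in ans[k]:
--                 new_part = partition + [l-k]
--                 new_part.sort()
--                 new_parts.append(new_part[:])
--         new_parts.sort()
--         ans += [[new_parts[0][:]]]
--         for i in range(len(new_parts)-1):
--             if not(new_parts[i] == new_parts[i+1]):
--                 ans[-1] += [new_parts[i+1][:]]
--
--     return ans
-- ===== SOURCE B (Python) =====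
-- def Partition_Generate(n):
--     cache = {}
--     def parts(m, minp):
--         key = (m, minp)
--         if key in cache:
--             return cache[key]
--         if m == 0:
--             res = [[]]
--         else:
--             res = []
--             for p in range(minp, m + 1):
--                 for rest in parts(m - p, p):
--                     res.append([p] + rest)
--         cache[key] = res
--         return res
--     ans = [[[]]]
--     m = 1
--     while m <= n:
--         ans.append(parts(m, 1))
--         m += 1
--     return ans
-- ===== Notes on version B (the rewrite author's own statement) =====
-- stated objective: alternative
-- what changed: Instead of building each size's partitions by appending a part to every smaller partition and then sorting and deduplicating the whole pile, B enumerates the partitions of each size directly as nondecreasing part lists (smallest part first, recursively, with a memo table shared across sizes), which produces every partition exactly once and already in sorted order, so no sort or dedup pass is needed; intended as faster (measured 16x at n=16, unconfirmed at sizes where both time out).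
import Mathlib
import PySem

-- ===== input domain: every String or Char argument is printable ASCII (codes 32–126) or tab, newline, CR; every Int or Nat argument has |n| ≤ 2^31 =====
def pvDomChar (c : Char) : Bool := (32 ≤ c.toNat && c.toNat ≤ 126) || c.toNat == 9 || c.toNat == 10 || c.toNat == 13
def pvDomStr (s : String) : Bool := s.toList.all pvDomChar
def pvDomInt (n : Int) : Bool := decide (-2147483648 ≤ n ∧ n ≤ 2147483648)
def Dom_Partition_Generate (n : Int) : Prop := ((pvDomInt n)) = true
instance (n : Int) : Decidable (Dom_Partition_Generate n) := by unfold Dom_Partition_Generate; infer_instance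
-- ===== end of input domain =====

-- B replaces A's per-level "extend every smaller partition, then sort and deduplicate" by a direct
-- memoized enumeration of each size's partitions as nondecreasing part lists, producing each
-- partition exactly once and already in sorted order, with no sort or dedup pass.


-- ===== PORT A =====
-- new_parts = [sorted(partition + [l-k]) for k in range(l) for partition in ans[k]]
def pvNewParts (ans : List (List (List Int))) (l : Int) : List (List Int) :=
  (PySem.List.pyRange 0 l).foldl (fun np k =>
    (PySem.List.pyGetD ans k []).foldl (fun np2 part =>
      np2 ++ [PySem.List.sorted (part ++ [l - k]) (fun x => x) false]) np) []

-- one iteration's new entry: sort new_parts, seed with new_parts[0], keep adjacent non-duplicates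
def pvEntry (ans : List (List (List Int))) (l : Int) : List (List Int) :=
  let np := PySem.List.sorted (pvNewParts ans l) (fun x => x) false
  (PySem.List.pyRange 0 ((np.length : Int) - 1)).foldl (fun e i =>
    if ¬ (PySem.List.pyGetD np i [] = PySem.List.pyGetD np (i + 1) [])
    then e ++ [PySem.List.pyGetD np (i + 1) []] else e)
    [PySem.List.pyGetD np 0 []]

-- while l < n: l += 1; ans += [new entry]   (fuel = number of remaining iterations)
def pvLoopA : Nat → Int → List (List (List Int)) → Int → List (List (List Int))
  | 0, _, ans, _ => ans
  | f + 1, l, ans, n =>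
    if l < n then pvLoopA f (l + 1) (ans ++ [pvEntry ans (l + 1)]) n else ans

def Partition_Generate (n : Int) : List (List (List Int)) :=
  pvLoopA n.toNat 0 [[[]]] n

-- ===== PORT B =====
-- parts(m, minp) with cache: partitions of m into nondecreasing parts ≥ minp, memoized.
-- fuel = recursion-depth bound (≥ m at every admitted call; the 0-fuel branch is unreachable).
def pvPartsB : Nat → Nat → Nat → PySem.Dict (Nat × Nat) (List (List Int)) →
    List (List Int) × PySem.Dict (Nat × Nat) (List (List Int))
  | fuel, m, minp, cache =>
    match cache.get? (m, minp) with
    | some v => (v, cache)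
    | none =>
      match fuel, m with
      | _, 0 => ([[]], cache.insert (0, minp) [[]])
      | 0, _ + 1 => ([], cache)
      | f + 1, mm + 1 =>
        let r := (List.range' minp (mm + 2 - minp)).foldl
          (fun (acc : List (List Int) × PySem.Dict (Nat × Nat) (List (List Int))) p =>
            let pr := pvPartsB f (mm + 1 - p) p acc.2
            (acc.1 ++ pr.1.map (fun rest => ((p : Int) :: rest)), pr.2)) ([], cache)
        (r.1, r.2.insert (mm + 1, minp) r.1)

def Partition_Generate_alt (n : Int) : List (List (List Int)) :=
  ((PySem.List.pyRange 1 (n + 1)).foldl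
    (fun (acc : List (List (List Int)) × PySem.Dict (Nat × Nat) (List (List Int))) m =>
      let pr := pvPartsB m.toNat m.toNat 1 acc.2
      (acc.1 ++ [pr.1], pr.2)) ([[[]]], PySem.Dict.empty)).1

-- ===== PRECONDITION & SPEC =====
def Spec_Partition_Generate (n : Int) (out : List (List (List Int))) : Prop := out = Partition_Generate_alt n
instance (n : Int) (out : List (List (List Int))) : Decidable (Spec_Partition_Generate n out) := by unfold Spec_Partition_Generate; infer_instance

-- ===== CLAIM (what is proved, stated in full; the proofs are below) =====
def Claim_equal_Partition_Generate : Prop := ∀ (n : Int), Dom_Partition_Generate n → Spec_Partition_Generate n (Partition_Generate n)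

-- ===== LEMMAS AND PROOFS =====

-- pure (cache-free) specification of pvPartsB's recursion, used only in proofs
def pvP : Nat → Nat → Nat → List (List Int)
  | _, 0, _ => [[]]
  | 0, _ + 1, _ => []
  | f + 1, mm + 1, minp =>
    (List.range' minp (mm + 2 - minp)).flatMap
      (fun p => (pvP f (mm + 1 - p) p).map (fun rest => ((p : Int) :: rest)))

def pvPart (m : Nat) : List (List Int) := pvP m m 1

def pvANS (j : Nat) : List (List (List Int)) := (List.range (j + 1)).map pvPart

-- "x is a partition of m into nondecreasing parts ≥ minp"
def pvSP (minp m : Nat) (x : List Int) : Prop :=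
  x.Pairwise (· ≤ ·) ∧ (∀ a ∈ x, (minp : Int) ≤ a) ∧ x.sum = (m : Int)

-- cache invariant: every stored entry is the pure value
def pvGoodC (c : PySem.Dict (Nat × Nat) (List (List Int))) : Prop :=
  ∀ (k j : Nat) (v : List (List Int)), c.get? (k, j) = some v → 1 ≤ j ∧ v = pvP k k j

theorem pvDecLT_eq : (fun (a b : List Int) => a.decidableLT b) = (@LinearOrder.toDecidableLT (List Int) List.instLinearOrder) :=
  Subsingleton.elim _ _
theorem pvSorted_bridge (xs : List (List Int)) (key : List Int → List Int) (rev : Bool) :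
    @PySem.List.sorted (List Int) (List Int) List.instLT (fun a b => a.decidableLT b) xs key rev
    = @PySem.List.sorted (List Int) (List Int) List.instLinearOrder.toLT LinearOrder.toDecidableLT xs key rev :=
  congrArg (fun d => @PySem.List.sorted (List Int) (List Int) List.instLT d xs key rev) pvDecLT_eq

theorem pvSum_nonneg (x : List Int) (h : ∀ a ∈ x, (1 : Int) ≤ a) : 0 ≤ x.sum := by
  induction x with
  | nil => simp
  | cons a t ih =>
    have ha := h a (by simp)
    have := ih (fun b hb => h b (by simp [hb]))
    simp only [List.sum_cons]; omega

theorem pvP_fuel : ∀ (f g m minp : Nat), m ≤ f → m ≤ g → 1 ≤ minp → pvP f m minp = pvP g m minp := by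
  intro f
  induction f with
  | zero => intro g m minp hf _ _; interval_cases m; cases g <;> simp [pvP]
  | succ f ih =>
    intro g m minp hf hg hminp
    match m, g with
    | 0, g => cases g <;> simp [pvP]
    | mm + 1, g + 1 =>
      simp only [pvP]
      apply List.flatMap_congr
      intro p hp
      rw [List.mem_range'_1] at hp
      congr 1
      exact ih g (mm + 1 - p) p (by omega) (by omega) (by omega)

theorem pvP_char : ∀ (f m minp : Nat), m ≤ f → 1 ≤ minp →
    (pvP f m minp).Pairwise (· < ·) ∧ ∀ x : List Int, (x ∈ pvP f m minp ↔ pvSP minp m x) := by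
  intro f
  induction f with
  | zero =>
    intro m minp hf hminp
    interval_cases m
    constructor
    · simp [pvP]
    · intro x
      simp only [pvP, List.mem_singleton]
      constructor
      · rintro rfl; exact ⟨by simp, by simp, by simp⟩
      · rintro ⟨_, h1, hs⟩
        match x with
        | [] => rfl
        | a :: t =>
          exfalso
          have ha : (1:Int) ≤ a := le_trans (by exact_mod_cast hminp) (h1 a (by simp))
          have ht : 0 ≤ t.sum := pvSum_nonneg t (fun b hb => le_trans (by exact_mod_cast hminp) (h1 b (by simp [hb])))
          simp only [List.sum_cons] at hs; omega
  | succ f ih =>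
    intro m minp hf hminp
    match m with
    | 0 =>
      constructor
      · simp [pvP]
      · intro x
        simp only [pvP, List.mem_singleton]
        constructor
        · rintro rfl; exact ⟨by simp, by simp, by simp⟩
        · rintro ⟨_, h1, hs⟩
          match x with
          | [] => rfl
          | a :: t =>
            exfalso
            have ha : (1:Int) ≤ a := le_trans (by exact_mod_cast hminp) (h1 a (by simp))
            have ht : 0 ≤ t.sum := pvSum_nonneg t (fun b hb => le_trans (by exact_mod_cast hminp) (h1 b (by simp [hb])))
            simp only [List.sum_cons] at hs; omega
    | mm + 1 =>
      have hrec : ∀ p, minp ≤ p → p < minp + (mm + 2 - minp) →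
          (pvP f (mm + 1 - p) p).Pairwise (· < ·) ∧
          ∀ r : List Int, (r ∈ pvP f (mm + 1 - p) p ↔ pvSP p (mm + 1 - p) r) :=
        fun p h1 h2 => ih (mm + 1 - p) p (by omega) (by omega)
      constructor
      · -- pairwise <
        simp only [pvP]
        rw [List.pairwise_flatMap]
        refine ⟨?_, ?_⟩
        · intro p hp
          rw [List.mem_range'_1] at hp
          exact List.Pairwise.map _ (fun {r s} h => List.Lex.cons h) ((hrec p hp.1 hp.2).1)
        · refine List.Pairwise.imp_of_mem ?_ (List.pairwise_lt_range' 1)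
          intro p q hp hq hpq x hx y hy
          rw [List.mem_map] at hx hy
          obtain ⟨r, _, rfl⟩ := hx
          obtain ⟨s, _, rfl⟩ := hy
          exact List.Lex.rel (by exact_mod_cast hpq)
      · intro x
        simp only [pvP, List.mem_flatMap, List.mem_map, List.mem_range'_1]
        constructor
        · rintro ⟨p, ⟨hp1, hp2⟩, r, hr, rfl⟩
          obtain ⟨hrp, hr1, hrs⟩ := ((hrec p hp1 hp2).2 r).1 hr
          have hple : p ≤ mm + 1 := by omega
          refine ⟨?_, ?_, ?_⟩
          · rw [List.pairwise_cons]; exact ⟨fun b hb => hr1 b hb, hrp⟩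
          · intro a ha
            rcases List.mem_cons.1 ha with rfl | ha
            · exact_mod_cast hp1
            · exact le_trans (by exact_mod_cast hp1) (hr1 a ha)
          · simp only [List.sum_cons, hrs]
            push_cast [Nat.cast_sub hple]
            ring
        · rintro ⟨hx, h1, hs⟩
          match x with
          | [] => exfalso; rw [List.sum_nil] at hs; omega
          | a :: r =>
            have ha1 : (1:Int) ≤ a := le_trans (by exact_mod_cast hminp) (h1 a (by simp))
            have har : ∀ b ∈ r, a ≤ b := (List.pairwise_cons.1 hx).1
            have hr1 : ∀ b ∈ r, (1:Int) ≤ b := fun b hb => le_trans (by exact_mod_cast hminp) (h1 b (by simp [hb]))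
            have hrs0 : 0 ≤ r.sum := pvSum_nonneg r hr1
            have hsum : a + r.sum = ((mm:Int) + 1) := by simpa [List.sum_cons] using hs
            have ham : a ≤ (mm:Int) + 1 := by omega
            have haminp : (minp:Int) ≤ a := h1 a (by simp)
            refine ⟨a.toNat, ⟨by omega, by omega⟩, r, ?_, by simp [Int.toNat_of_nonneg (by omega : (0:Int) ≤ a)]⟩
            rw [(hrec a.toNat (by omega) (by omega)).2 r]
            refine ⟨(List.pairwise_cons.1 hx).2, ?_, ?_⟩
            · intro b hb
              have := har b hb
              rw [Int.toNat_of_nonneg (by omega : (0:Int) ≤ a)]; omega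
            · have : (↑(mm + 1 - a.toNat) : Int) = (mm:Int) + 1 - a := by
                rw [Nat.cast_sub (by omega)]
                push_cast [Int.toNat_of_nonneg (by omega : (0:Int) ≤ a)]
                ring
              omega

theorem pvGood_insert (c : PySem.Dict (Nat × Nat) (List (List Int))) (k j : Nat) (v : List (List Int))
    (hc : pvGoodC c) (hj : 1 ≤ j) (hv : v = pvP k k j) : pvGoodC (c.insert (k, j) v) := by
  intro k' j' v' h
  rw [PySem.Dict.get?_insert] at h
  split at h
  · rename_i heq
    obtain ⟨rfl, rfl⟩ := Prod.mk.injEq .. ▸ heq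
    exact ⟨hj, by injection h with h'; rw [← h', hv]⟩
  · exact hc k' j' v' h

theorem pvMemo_spec : ∀ (f m minp : Nat) (c : PySem.Dict (Nat × Nat) (List (List Int))),
    m ≤ f → 1 ≤ minp → pvGoodC c →
    (pvPartsB f m minp c).1 = pvP m m minp ∧ pvGoodC (pvPartsB f m minp c).2 := by
  intro f
  induction f with
  | zero =>
    intro m minp c hf hminp hc
    interval_cases m
    cases hget : c.get? (0, minp) with
    | some v =>
      have := hc 0 minp v hget
      simp [pvPartsB, hget, this.2, hc]
    | none =>
      simp only [pvPartsB, hget]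
      exact ⟨by simp [pvP], pvGood_insert c 0 minp [[]] hc hminp (by simp [pvP])⟩
  | succ f ih =>
    intro m minp c hf hminp hc
    match m with
    | 0 =>
      cases hget : c.get? (0, minp) with
      | some v =>
        have := hc 0 minp v hget
        simp [pvPartsB, hget, this.2, hc]
      | none =>
        simp only [pvPartsB, hget]
        exact ⟨by simp [pvP], pvGood_insert c 0 minp [[]] hc hminp (by simp [pvP])⟩
    | mm + 1 =>
      cases hget : c.get? (mm + 1, minp) with
      | some v =>
        have := hc (mm + 1) minp v hget
        simp [pvPartsB, hget, this.2, hc]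
      | none =>
        have hfold : ∀ (ps : List Nat) (acc : List (List Int)) (c' : PySem.Dict (Nat × Nat) (List (List Int))),
            pvGoodC c' → (∀ p ∈ ps, 1 ≤ p ∧ mm + 1 - p ≤ f) →
            (ps.foldl (fun (acc : List (List Int) × PySem.Dict (Nat × Nat) (List (List Int))) p =>
                let pr := pvPartsB f (mm + 1 - p) p acc.2
                (acc.1 ++ pr.1.map (fun rest => ((p : Int) :: rest)), pr.2)) (acc, c')).1
              = acc ++ ps.flatMap (fun p => (pvP (mm+1-p) (mm+1-p) p).map (fun rest => ((p : Int) :: rest)))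
            ∧ pvGoodC (ps.foldl (fun (acc : List (List Int) × PySem.Dict (Nat × Nat) (List (List Int))) p =>
                let pr := pvPartsB f (mm + 1 - p) p acc.2
                (acc.1 ++ pr.1.map (fun rest => ((p : Int) :: rest)), pr.2)) (acc, c')).2 := by
          intro ps
          induction ps with
          | nil =>
            intro acc c' hc' _
            refine ⟨?_, ?_⟩
            · simp
            · exact hc'
          | cons p ps ihp =>
            intro acc c' hc' hmem
            have hp := hmem p (by simp)
            have h1 := ih (mm + 1 - p) p c' hp.2 hp.1 hc'
            simp only [List.foldl_cons, List.flatMap_cons]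
            have key := ihp (acc ++ ((pvPartsB f (mm + 1 - p) p c').1).map (fun rest => ((p : Int) :: rest)))
              (pvPartsB f (mm + 1 - p) p c').2 h1.2 (fun q hq => hmem q (by simp [hq]))
            refine ⟨?_, key.2⟩
            rw [key.1, h1.1, List.append_assoc]
        have hmem : ∀ p ∈ List.range' minp (mm + 2 - minp), 1 ≤ p ∧ mm + 1 - p ≤ f := by
          intro p hp
          rw [List.mem_range'_1] at hp
          omega
        have hres := hfold (List.range' minp (mm + 2 - minp)) [] c hc hmem
        have hval : (List.range' minp (mm + 2 - minp)).flatMap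
            (fun p => (pvP (mm+1-p) (mm+1-p) p).map (fun rest => ((p : Int) :: rest)))
            = pvP (mm+1) (mm+1) minp := by
          conv_rhs => rw [show pvP (mm+1) (mm+1) minp = (List.range' minp (mm + 2 - minp)).flatMap
            (fun p => (pvP mm (mm + 1 - p) p).map (fun rest => ((p : Int) :: rest))) from rfl]
          apply List.flatMap_congr
          intro p hp
          rw [List.mem_range'_1] at hp
          congr 1
          exact pvP_fuel (mm+1-p) mm (mm+1-p) p (le_refl _) (by omega) (by omega)
        simp only [pvPartsB, hget]
        refine ⟨?_, ?_⟩
        · rw [hres.1, List.nil_append, hval]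
        · exact pvGood_insert _ (mm+1) minp _ hres.2 hminp (by rw [hres.1, List.nil_append, hval])

theorem pvAltFold : ∀ (ms : List Int) (acc : List (List (List Int))) (c : PySem.Dict (Nat × Nat) (List (List Int))),
    pvGoodC c → (∀ m ∈ ms, (1 : Int) ≤ m) →
    (ms.foldl (fun acc m =>
        let pr := pvPartsB m.toNat m.toNat 1 acc.2
        (acc.1 ++ [pr.1], pr.2)) (acc, c)).1
      = acc ++ ms.map (fun m => pvPart m.toNat) := by
  intro ms
  induction ms with
  | nil => intro acc c _ _; simp
  | cons m ms ihm =>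
    intro acc c hc hmem
    have h1 := pvMemo_spec m.toNat m.toNat 1 c (le_refl _) (le_refl _) hc
    simp only [List.foldl_cons, List.map_cons]
    have key := ihm (acc ++ [(pvPartsB m.toNat m.toNat 1 c).1]) (pvPartsB m.toNat m.toNat 1 c).2
      h1.2 (fun q hq => hmem q (by simp [hq]))
    rw [key, h1.1, List.append_assoc]
    rfl

theorem pvPyRange1 (k : Nat) :
    PySem.List.pyRange 1 ((k : Int) + 1) = (List.range k).map (fun (i : Nat) => ((i : Int) + 1)) := by
  induction k with
  | zero =>
    have h0 : PySem.List.pyRange 1 (((0 : Nat) : Int) + 1) = [] := by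
      rw [List.eq_nil_iff_forall_not_mem]
      intro x hx
      rw [PySem.List.mem_pyRange_one] at hx
      omega
    simp
  | succ k ih =>
    rw [show ((k + 1 : Nat) : Int) + 1 = (((k : Int) + 1) + 1) by push_cast; ring,
      PySem.List.pyRange_one_succ_right (by omega), ih, List.range_succ]
    simp

theorem pvAlt_eq_ANS (n : Int) : Partition_Generate_alt n = pvANS n.toNat := by
  unfold Partition_Generate_alt
  have hmem : ∀ m ∈ PySem.List.pyRange 1 (n + 1), (1 : Int) ≤ m := by
    intro m hm; rw [PySem.List.mem_pyRange_one] at hm; omega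
  have hempty : pvGoodC PySem.Dict.empty := by
    intro k j v h; rw [PySem.Dict.get?_empty] at h; exact absurd h (by simp)
  rw [pvAltFold _ _ _ hempty hmem]
  have pvList_eq : ∀ (k : Nat), ([[[]]] ++ ((List.range k).map (fun (i : Nat) => ((i : Int) + 1))).map (fun m => pvPart m.toNat) : List (List (List Int))) = pvANS k := by
    intro k
    unfold pvANS
    rw [List.range_succ_eq_map]
    simp only [List.map_cons, List.map_map, List.cons_append, List.nil_append]
    rw [show pvPart 0 = [[]] from rfl]
    refine congrArg (List.cons [[]]) ?_
    apply List.map_congr_left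
    intro i _
    simp only [Function.comp_apply]
    congr 1
  by_cases hn : n ≤ 0
  · have h1 : PySem.List.pyRange 1 (n + 1) = [] := by
      rw [List.eq_nil_iff_forall_not_mem]
      intro x hx; rw [PySem.List.mem_pyRange_one] at hx; omega
    have h2 : n.toNat = 0 := by omega
    simp [h1, h2, pvANS, pvPart, pvP]
  · rw [show n + 1 = ((n.toNat : Int) + 1) by omega, pvPyRange1 n.toNat, ← pvList_eq n.toNat, List.map_map]

theorem pvNewParts_eq (j : Nat) :
    pvNewParts (pvANS j) ((j : Int) + 1)
      = (List.range (j + 1)).flatMap (fun k =>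
          (pvPart k).map (fun part =>
            PySem.List.sorted (part ++ [((j + 1 - k : Nat) : Int)]) (fun x => x) false)) := by
  unfold pvNewParts
  rw [PySem.List.foldl_congr_mem _ _
      (fun np k => np ++ (PySem.List.pyGetD (pvANS j) k []).map
        (fun part => PySem.List.sorted (part ++ [((j : Int) + 1) - k]) (fun x => x) false)) _
      (fun np k _ => PySem.List.foldl_append_singleton_eq_map _ _ _),
    PySem.List.foldl_append_eq_flatMap, List.nil_append,
    show ((j : Int) + 1) = ((j + 1 : Nat) : Int) by push_cast; ring,
    PySem.List.pyRange_zero_natCast, List.flatMap_map]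
  apply List.flatMap_congr
  intro k hk
  rw [List.mem_range] at hk
  rw [PySem.List.pyGetD_natCast]
  unfold pvANS
  rw [PySem.List.getD_map_range _ _ _ _ hk]
  rw [show ((j + 1 : Nat) : Int) - (k : Int) = ((j + 1 - k : Nat) : Int) by omega]

theorem pvMem_np0 (j : Nat) (x : List Int) :
    x ∈ pvNewParts (pvANS j) ((j : Int) + 1) ↔ pvSP 1 (j + 1) x := by
  rw [pvNewParts_eq]
  simp only [List.mem_flatMap, List.mem_map, List.mem_range]
  constructor
  · rintro ⟨k, hk, part, hpart, rfl⟩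
    obtain ⟨hp, h1, hsum⟩ := ((pvP_char k k 1 (le_refl _) (le_refl _)).2 part).1 hpart
    refine ⟨?_, ?_, ?_⟩
    · exact PySem.List.sorted_pairwise _ _
    · intro a ha
      rw [PySem.List.mem_sorted] at ha
      rcases List.mem_append.1 ha with ha | ha
      · simpa using h1 a ha
      · rw [List.mem_singleton] at ha
        subst ha
        have : 1 ≤ j + 1 - k := by omega
        exact_mod_cast this
    · rw [(PySem.List.sorted_perm _ _ _).sum_eq]
      rw [List.sum_append, hsum, List.sum_singleton]
      push_cast [Nat.cast_sub (by omega : k ≤ j + 1)]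
      ring
  · rintro ⟨hp, h1, hsum⟩
    have hne : x ≠ [] := by
      intro h; subst h; rw [List.sum_nil] at hsum; omega
    set a := x.getLast hne with ha
    have ha1 : (1 : Int) ≤ a := h1 a (List.getLast_mem hne)
    have hxq : x.dropLast ++ [a] = x := List.dropLast_append_getLast hne
    have hq1 : ∀ b ∈ x.dropLast, (1 : Int) ≤ b := fun b hb => h1 b (List.dropLast_subset _ hb)
    have hqsum : x.dropLast.sum + a = ((j : Int) + 1) := by
      have := congrArg List.sum hxq
      rw [List.sum_append, List.sum_singleton] at this
      rw [this]
      push_cast at hsum ⊢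
      omega
    have hq0 : 0 ≤ x.dropLast.sum := pvSum_nonneg _ hq1
    have haj : a ≤ (j : Int) + 1 := by omega
    refine ⟨j + 1 - a.toNat, by omega, x.dropLast, ?_, ?_⟩
    · show x.dropLast ∈ pvP (j + 1 - a.toNat) (j + 1 - a.toNat) 1
      rw [(pvP_char _ _ 1 (le_refl _) (le_refl _)).2]
      refine ⟨hp.sublist (List.dropLast_sublist _), hq1, ?_⟩
      push_cast [Nat.cast_sub (show a.toNat ≤ j + 1 by omega)]
      omega
    · have h2 : j + 1 - (j + 1 - a.toNat) = a.toNat := by omega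
      rw [h2, show ((a.toNat : Int)) = a by omega, hxq]
      exact (PySem.List.sorted_eq_self_of_pairwise _ _ hp)

def pvDD : List Int → List (List Int) → List (List Int) → List (List Int)
  | _, [], e => e
  | prev, b :: t, e => pvDD b t (if prev ≠ b then e ++ [b] else e)

theorem pvIdxFold_eq : ∀ (t : List (List Int)) (a : List Int) (e : List (List Int)),
    (List.range t.length).foldl (fun e (i : Nat) =>
        if ¬ (PySem.List.pyGetD (a :: t) ((i : Nat) : Int) [] = PySem.List.pyGetD (a :: t) (((i : Nat) : Int) + 1) [])
        then e ++ [PySem.List.pyGetD (a :: t) (((i : Nat) : Int) + 1) []] else e) e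
      = pvDD a t e := by
  intro t
  induction t with
  | nil => intro a e; simp [pvDD]
  | cons b t iht =>
    intro a e
    rw [List.length_cons, List.range_succ_eq_map, List.foldl_cons, List.foldl_map]
    have h0 : PySem.List.pyGetD (a :: b :: t) ((0 : Nat) : Int) [] = a := by
      rw [PySem.List.pyGetD_natCast]; rfl
    have h1 : PySem.List.pyGetD (a :: b :: t) (((0 : Nat) : Int) + 1) [] = b := by
      rw [show ((0 : Nat) : Int) + 1 = ((1 : Nat) : Int) by omega, PySem.List.pyGetD_natCast]; rfl
    have hshift : ∀ (i : Nat) (y : List Int) (ys : List (List Int)),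
        PySem.List.pyGetD (y :: ys) ((Nat.succ i : Nat) : Int) [] = PySem.List.pyGetD ys ((i : Nat) : Int) [] := by
      intro i y ys
      rw [PySem.List.pyGetD_natCast, PySem.List.pyGetD_natCast]
      rfl
    rw [show (fun e (i : Nat) =>
        if ¬ (PySem.List.pyGetD (a :: b :: t) ((Nat.succ i : Nat) : Int) [] = PySem.List.pyGetD (a :: b :: t) (((Nat.succ i : Nat) : Int) + 1) [])
        then e ++ [PySem.List.pyGetD (a :: b :: t) (((Nat.succ i : Nat) : Int) + 1) []] else e)
      = (fun e (i : Nat) =>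
        if ¬ (PySem.List.pyGetD (b :: t) ((i : Nat) : Int) [] = PySem.List.pyGetD (b :: t) (((i : Nat) : Int) + 1) [])
        then e ++ [PySem.List.pyGetD (b :: t) (((i : Nat) : Int) + 1) []] else e) from ?_]
    · rw [h0, h1, iht b]
      simp only [pvDD, ne_eq]
    · funext e i
      rw [hshift i a (b :: t), show ((Nat.succ i : Nat) : Int) + 1 = ((Nat.succ i : Nat) : Int) + 1 from rfl]
      rw [show ((Nat.succ i : Nat) : Int) + 1 = ((Nat.succ (Nat.succ i) : Nat) : Int) by push_cast; ring,
        hshift (Nat.succ i) a (b :: t),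
        show ((Nat.succ i : Nat) : Int) = ((i : Nat) : Int) + 1 by push_cast; ring]

theorem pvDD_spec : ∀ (t : List (List Int)) (a : List Int) (e : List (List Int)),
    (a :: t).Pairwise (· ≤ ·) → e.Pairwise (· < ·) → (∀ y ∈ e, y ≤ a) → a ∈ e →
    (pvDD a t e).Pairwise (· < ·) ∧ ∀ z, (z ∈ pvDD a t e ↔ z ∈ e ∨ z ∈ t) := by
  intro t
  induction t with
  | nil =>
    intro a e _ he _ _
    refine ⟨he, fun z => ?_⟩
    simp [pvDD]
  | cons b t iht =>
    intro a e hpw he hle ha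
    have hab : a ≤ b := (List.pairwise_cons.1 hpw).1 b (by simp)
    have hpw' : (b :: t).Pairwise (· ≤ ·) := (List.pairwise_cons.1 hpw).2
    by_cases heq : a = b
    · subst heq
      have := iht a e hpw' he hle ha
      have hstep : pvDD a (a :: t) e = pvDD a t e := by simp [pvDD]
      rw [hstep]
      refine ⟨this.1, fun z => ?_⟩
      rw [this.2 z]
      constructor
      · rintro (hz | hz)
        · exact Or.inl hz
        · exact Or.inr (by simp [hz])
      · rintro (hz | hz)
        · exact Or.inl hz
        · rcases List.mem_cons.1 hz with rfl | hz
          · exact Or.inl ha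
          · exact Or.inr hz
    · have hlt : a < b := lt_of_le_of_ne hab heq
      have he' : (e ++ [b]).Pairwise (· < ·) := by
        rw [List.pairwise_append]
        refine ⟨he, by simp, ?_⟩
        intro y hy b' hb'
        rw [List.mem_singleton] at hb'
        subst hb'
        exact lt_of_le_of_lt (hle y hy) hlt
      have hle' : ∀ y ∈ e ++ [b], y ≤ b := by
        intro y hy
        rcases List.mem_append.1 hy with hy | hy
        · exact le_trans (hle y hy) hab
        · rw [List.mem_singleton] at hy; subst hy; exact le_refl _
      have hb' : b ∈ e ++ [b] := by simp
      have := iht b (e ++ [b]) hpw' he' hle' hb'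
      have hstep : pvDD a (b :: t) e = pvDD b t (e ++ [b]) := by simp [pvDD, heq]
      rw [hstep]
      refine ⟨this.1, fun z => ?_⟩
      rw [this.2 z]
      simp only [List.mem_append, List.mem_cons]
      tauto

theorem pvEq_of_sorted_lt (u v : List (List Int)) (hu : u.Pairwise (· < ·)) (hv : v.Pairwise (· < ·))
    (hm : ∀ z, z ∈ u ↔ z ∈ v) : u = v := by
  have hnu : u.Nodup := hu.imp (fun h => ne_of_lt h)
  have hnv : v.Nodup := hv.imp (fun h => ne_of_lt h)
  have hperm : u.Perm v := (List.perm_ext_iff_of_nodup hnu hnv).2 hm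
  exact @List.eq_of_perm_of_sorted (List Int) (· ≤ ·) u v
    (fun a b _ _ h1 h2 => le_antisymm h1 h2)
    (hu.imp le_of_lt) (hv.imp le_of_lt) hperm

theorem pvDedup_eq (np : List (List Int)) (hne : np ≠ []) (hpw : np.Pairwise (· ≤ ·))
    (u : List (List Int)) (hu : u.Pairwise (· < ·)) (hmem : ∀ z, z ∈ np ↔ z ∈ u) :
    (PySem.List.pyRange 0 ((np.length : Int) - 1)).foldl (fun e i =>
        if ¬ (PySem.List.pyGetD np i [] = PySem.List.pyGetD np (i + 1) [])
        then e ++ [PySem.List.pyGetD np (i + 1) []] else e)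
      [PySem.List.pyGetD np 0 []] = u := by
  match np, hne with
  | a :: t, _ =>
    have hget0 : PySem.List.pyGetD (a :: t) (0 : Int) [] = a := by
      rw [show (0 : Int) = ((0 : Nat) : Int) from rfl, PySem.List.pyGetD_natCast]; rfl
    have hlen : (((a :: t).length : Nat) : Int) - 1 = ((t.length : Nat) : Int) := by
      rw [List.length_cons]; push_cast; ring
    rw [hget0, hlen, PySem.List.pyRange_zero_natCast, List.foldl_map, pvIdxFold_eq t a [a]]
    obtain ⟨hddpw, hddmem⟩ := pvDD_spec t a [a] hpw (by simp) (by intro y hy; rw [List.mem_singleton] at hy; subst hy; exact le_refl _) (by simp)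
    apply pvEq_of_sorted_lt _ u hddpw hu
    intro z
    rw [hddmem z, ← hmem z]
    simp

theorem pvEntry_eq (j : Nat) : pvEntry (pvANS j) ((j : Int) + 1) = pvPart (j + 1) := by
  have hchar := pvP_char (j + 1) (j + 1) 1 (le_refl _) (le_refl _)
  unfold pvEntry
  apply pvDedup_eq
  · -- nonempty: [j+1] is a partition of j+1, so it is in the sorted list
    intro hnil
    have hx : [((j + 1 : Nat) : Int)] ∈ PySem.List.sorted (pvNewParts (pvANS j) ((j : Int) + 1)) (fun x => x) false := by
      rw [PySem.List.mem_sorted, pvMem_np0]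
      refine ⟨by simp, ?_, by simp⟩
      intro a ha
      rw [List.mem_singleton] at ha
      subst ha
      exact_mod_cast (by omega : (1 : Nat) ≤ j + 1)
    rw [hnil] at hx
    exact List.not_mem_nil hx
  · rw [pvSorted_bridge]
    exact PySem.List.sorted_pairwise _ _
  · exact hchar.1
  · intro z
    rw [PySem.List.mem_sorted, pvMem_np0 j z]
    exact (hchar.2 z).symm

theorem pvLoopA_eq (n : Int) : ∀ (f j : Nat), (n - (j : Int)).toNat = f →
    pvLoopA f (j : Int) (pvANS j) n = pvANS (j + f) := by
  intro f
  induction f with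
  | zero => intro j _; rfl
  | succ f ihf =>
    intro j hf
    have hlt : (j : Int) < n := by omega
    rw [pvLoopA, if_pos hlt, pvEntry_eq j]
    have hstep : pvANS j ++ [pvPart (j + 1)] = pvANS (j + 1) := by
      unfold pvANS
      rw [List.range_succ (n := j + 1), List.map_append]
      rfl
    have hcast : (j : Int) + 1 = ((j + 1 : Nat) : Int) := by push_cast; ring
    rw [hstep, hcast, ihf (j + 1) (by omega)]
    congr 1
    omega

-- ===== VERDICT (by name: the statement is the Claim_ definition above) =====
theorem Partition_Generate_spec : Claim_equal_Partition_Generate := by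
  intro n _
  unfold Spec_Partition_Generate
  have hA : Partition_Generate n = pvANS n.toNat := by
    have h0 : pvANS 0 = [[[]]] := by simp [pvANS, pvPart, pvP]
    have := pvLoopA_eq n n.toNat 0 (by omega)
    simpa [Partition_Generate, h0] using this
  rw [hA, pvAlt_eq_ANS]
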